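-- pv_equiv track=rewrite | github.com/hackyourlife/orakel | utils.py | parse
-- ===== SOURCE A (Python) =====
-- def parse(line):
-- 	tokens = []
-- 	token = []
-- 	instring = False
--
-- 	for i in range(len(line)):
-- 		c = line[i]
-- 		if instring:
-- 			if c == '"':
-- 				instring = False
-- 			else:
-- 				token += [c]
-- 		elif c == '"':
-- 			instring = True
-- 		elif c in ['\t', '\r', '\n', ' ']:
-- 			if len(token) != 0:
-- 				tokens += [ "".join(token) ]
-- 				token = []
-- 		else:
-- 			token += [c]
-- 	if instring:
-- 		raise SyntaxError("missing dquote")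
-- 	if len(token) != 0:
-- 		tokens += [ "".join(token) ]
--
-- 	return tokens
-- ===== SOURCE B (Python) =====
-- def _emit(tokens, cur, part):
-- 	# split a quote-free segment on whitespace; chunks between whitespace become tokens
-- 	chunks = part.replace('\t', ' ').replace('\r', ' ').replace('\n', ' ').split(' ')
-- 	cur += chunks[0]
-- 	for ch in chunks[1:]:
-- 		if cur:
-- 			tokens.append(cur)
-- 		cur = ch
-- 	return cur
--
-- def parse(line):
-- 	parts = line.split('"')
-- 	if len(parts) % 2 == 0:
-- 		raise SyntaxError("missing dquote")
-- 	tokens = []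
-- 	cur = ""
-- 	inside = False
-- 	for part in parts:
-- 		if inside:
-- 			cur += part
-- 		else:
-- 			cur = _emit(tokens, cur, part)
-- 		inside = not inside
-- 	if cur:
-- 		tokens.append(cur)
-- 	return tokens
-- ===== Notes on version B (the rewrite author's own statement) =====
-- stated objective: faster
-- what changed: Replaces A's per-character Python state machine by splitting the line at '"' and whitespace-splitting only the even (outside-quote) segments while concatenating the odd (inside-quote) ones; the per-character Python loop disappears into C-level str.split/str.replace calls, a constant-factor speedup.
-- outside the precondition, e.g. on parse('"'): A raises SyntaxError, B raises SyntaxError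
import Mathlib
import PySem

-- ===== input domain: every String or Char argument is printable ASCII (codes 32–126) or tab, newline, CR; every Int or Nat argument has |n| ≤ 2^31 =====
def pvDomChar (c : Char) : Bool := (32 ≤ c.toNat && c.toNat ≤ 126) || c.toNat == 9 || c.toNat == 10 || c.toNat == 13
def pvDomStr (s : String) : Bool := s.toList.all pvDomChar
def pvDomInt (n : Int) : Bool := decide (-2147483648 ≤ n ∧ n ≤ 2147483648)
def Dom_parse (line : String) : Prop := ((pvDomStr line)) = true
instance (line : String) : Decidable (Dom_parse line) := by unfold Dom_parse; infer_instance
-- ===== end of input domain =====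

-- B replaces A's per-character string-state machine by splitting the line at '"' and
-- whitespace-splitting only the outside segments, moving the per-character work into
-- str.split/str.replace (objective: faster by a constant factor, measured).

-- ===== PORT A =====
-- A's for-loop over the characters, as the obvious structural recursion over the same
-- state (tokens, token, instring); branches in A's order.
def parseRun (tokens : List String) (token : List Char) (instring : Bool) :
    List Char → List String
  | [] =>
    -- A's epilogue; the `if instring: raise SyntaxError` path is excluded by Pre_parse
    if token ≠ [] then tokens ++ [String.ofList token] else tokens
  | c :: cs =>
    if instring then
      if c = '"' then parseRun tokens token false cs
      else parseRun tokens (token ++ [c]) true cs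
    else if c = '"' then parseRun tokens token true cs
    else if c = '\t' ∨ c = '\r' ∨ c = '\n' ∨ c = ' ' then
      if token ≠ [] then parseRun (tokens ++ [String.ofList token]) [] false cs
      else parseRun tokens token false cs
    else parseRun tokens (token ++ [c]) false cs

def parse (line : String) : List String := parseRun [] [] false line.toList

-- ===== PORT B =====
-- hand port of Python str.split(sep) for a single-character separator: exact
-- (keeps empty pieces, '' splits to ['']).
def splitChar (sep : Char) : List Char → List (List Char)
  | [] => [[]]
  | c :: cs =>
    let r := splitChar sep cs
    if c = sep then [] :: r
    else
      match r with
      | [] => [[c]]          -- unreachable: splitChar never returns []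
      | p :: ps => (c :: p) :: ps

-- port of part.replace('\t',' ').replace('\r',' ').replace('\n',' ') character-wise (exact)
def normWS (c : Char) : Char := if c = '\t' ∨ c = '\r' ∨ c = '\n' then ' ' else c

-- body of Source B's inner `for ch in chunks[1:]` loop
def flushChunk (st : List String × List Char) (ch : List Char) : List String × List Char :=
  (if st.2 ≠ [] then st.1 ++ [String.ofList st.2] else st.1, ch)

-- port of Source B's helper `_emit` (tokens is returned instead of mutated in place)
def emit (tokens : List String) (cur : List Char) (part : List Char) :
    List String × List Char :=
  match splitChar ' ' (part.map normWS) with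
  | [] => (tokens, cur)      -- unreachable: splitChar never returns []
  | c0 :: rest => rest.foldl flushChunk (tokens, cur ++ c0)

-- Source B's `for part in parts` loop with state (tokens, cur, inside)
def parseParts (tokens : List String) (cur : List Char) (inside : Bool) :
    List (List Char) → List String
  | [] => if cur ≠ [] then tokens ++ [String.ofList cur] else tokens
  | p :: ps =>
    if inside then parseParts tokens (cur ++ p) false ps
    else
      let st := emit tokens cur p
      parseParts st.1 st.2 true ps

def parse_alt (line : String) : List String :=
  let parts := splitChar '"' line.toList
  -- Source B raises SyntaxError when parts.length % 2 = 0; those inputs are outside Pre_parse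
  parseParts [] [] false parts

-- ===== PRECONDITION & SPEC =====
-- Pre_ excludes lines with an odd number of '"' characters: there Python A (and B) raise SyntaxError.
def Pre_parse (line : String) : Prop := (line.toList.count '"') % 2 = 0
instance (line : String) : Decidable (Pre_parse line) := by unfold Pre_parse; infer_instance

def pvWitness_parse : String := "a \"b c\" d"

def Spec_parse (line : String) (out : List String) : Prop := out = parse_alt line
instance (line : String) (out : List String) : Decidable (Spec_parse line out) := by unfold Spec_parse; infer_instance

-- ===== CLAIM (what is proved, stated in full; the proofs are below) =====
def Claim_equal_parse : Prop := ∀ (line : String), Dom_parse line → Pre_parse line → Spec_parse line (parse line)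

-- ===== LEMMAS AND PROOFS =====

-- gluing the quote-split parts back with '"' recovers the original characters
def joinQ : List (List Char) → List Char
  | [] => []
  | [p] => p
  | p :: ps => p ++ '"' :: joinQ ps

theorem splitChar_ne_nil (sep : Char) (l : List Char) : splitChar sep l ≠ [] := by
  cases l with
  | nil => simp [splitChar]
  | cons c cs =>
    simp only [splitChar]
    split
    · simp
    · cases splitChar sep cs <;> simp

theorem joinQ_splitChar (l : List Char) : joinQ (splitChar '"' l) = l := by
  induction l with
  | nil => rfl
  | cons c cs ih =>
    simp only [splitChar]
    by_cases hc : c = '"'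
    · simp only [if_pos hc]
      rcases hq : splitChar '"' cs with _ | ⟨p, ps⟩
      · exact absurd hq (splitChar_ne_nil _ _)
      · rw [hq] at ih
        subst hc
        cases ps <;> simp_all [joinQ]
    · simp only [if_neg hc]
      rcases hq : splitChar '"' cs with _ | ⟨p, ps⟩
      · exact absurd hq (splitChar_ne_nil _ _)
      · rw [hq] at ih
        cases ps <;> simp_all [joinQ]

theorem splitChar_not_mem (sep : Char) (l : List Char) :
    ∀ p ∈ splitChar sep l, sep ∉ p := by
  induction l with
  | nil => simp [splitChar]
  | cons c cs ih =>
    intro p hp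
    rcases hq : splitChar sep cs with _ | ⟨q, qs⟩
    · exact absurd hq (splitChar_ne_nil _ _)
    rw [show splitChar sep (c :: cs) = if c = sep then [] :: (q :: qs) else (c :: q) :: qs from by
      simp only [splitChar, hq]] at hp
    by_cases hc : c = sep
    · rw [if_pos hc] at hp
      rcases List.mem_cons.mp hp with h | h
      · subst h; simp
      · exact ih p (hq ▸ h)
    · rw [if_neg hc] at hp
      rcases List.mem_cons.mp hp with h | h
      · subst h
        intro hm
        rcases List.mem_cons.mp hm with h | h
        · exact hc h.symm
        · exact ih q (by rw [hq]; simp) h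
      · exact ih p (by rw [hq]; simp [h])

-- running A's machine in-string over a quote-free part just accumulates it
theorem parseRun_instring (p : List Char) (hq : '"' ∉ p) :
    ∀ (rest : List Char) (tokens : List String) (cur : List Char),
      parseRun tokens cur true (p ++ rest) = parseRun tokens (cur ++ p) true rest := by
  induction p with
  | nil => intro rest tokens cur; simp
  | cons c p' ih =>
    intro rest tokens cur
    have hc : ¬ c = '"' := fun h => hq (by simp [h])
    have hq' : '"' ∉ p' := fun h => hq (by simp [h])
    simp only [List.cons_append, parseRun, if_neg hc, if_true]
    rw [ih hq' rest tokens (cur ++ [c])]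
    simp

-- running A's machine out-of-string over a quote-free part = Source B's `_emit`
theorem parseRun_emit (p : List Char) (hq : '"' ∉ p) :
    ∀ (rest : List Char) (tokens : List String) (cur : List Char),
      parseRun tokens cur false (p ++ rest)
        = parseRun (emit tokens cur p).1 (emit tokens cur p).2 false rest := by
  induction p with
  | nil =>
    intro rest tokens cur
    simp [emit, splitChar]
  | cons c p' ih =>
    intro rest tokens cur
    have hc : ¬ c = '"' := fun h => hq (by simp [h])
    have hq' : '"' ∉ p' := fun h => hq (by simp [h])
    rcases hsp : splitChar ' ' (p'.map normWS) with _ | ⟨c0, rest'⟩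
    · exact absurd hsp (splitChar_ne_nil _ _)
    by_cases hws : c = '\t' ∨ c = '\r' ∨ c = '\n' ∨ c = ' '
    · have hn : normWS c = ' ' := by
        rcases hws with h | h | h | h <;> simp [normWS, h]
      have hemit : emit tokens cur (c :: p')
          = (emit (if cur ≠ [] then tokens ++ [String.ofList cur] else tokens) [] p') := by
        simp only [emit, List.map_cons, hn, splitChar, hsp]
        simp [List.foldl_cons, flushChunk]
      rw [hemit]
      simp only [List.cons_append, parseRun, if_neg hc, if_pos hws]
      by_cases hcur : cur = []
      · subst hcur
        simp only [ne_eq, not_true_eq_false, ite_false]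
        simpa using ih hq' rest tokens []
      · simp only [ne_eq, hcur, not_false_eq_true, if_pos]
        exact ih hq' rest (tokens ++ [String.ofList cur]) []
    · have hn : normWS c = c := by
        simp only [normWS, ite_eq_right_iff]
        intro h
        exact absurd (by tauto) hws
      have hcsp : ¬ c = ' ' := fun h => hws (by tauto)
      have hemit : emit tokens cur (c :: p') = emit tokens (cur ++ [c]) p' := by
        simp only [emit, List.map_cons, hn, splitChar, if_neg hcsp, hsp]
        simp [List.append_assoc]
      rw [hemit]
      simp only [List.cons_append, parseRun, if_neg hc, if_neg hws]
      exact ih hq' rest tokens (cur ++ [c])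

-- stepping lemmas for single constructors
theorem parseRun_quote_false (tokens : List String) (cur : List Char) (cs : List Char) :
    parseRun tokens cur false ('"' :: cs) = parseRun tokens cur true cs := by
  simp [parseRun]

theorem parseRun_quote_true (tokens : List String) (cur : List Char) (cs : List Char) :
    parseRun tokens cur true ('"' :: cs) = parseRun tokens cur false cs := by
  simp [parseRun]

theorem parseParts_cons_false (tokens : List String) (cur : List Char)
    (p : List Char) (ps : List (List Char)) :
    parseParts tokens cur false (p :: ps)
      = parseParts (emit tokens cur p).1 (emit tokens cur p).2 true ps := by
  simp [parseParts]

theorem parseParts_cons_true (tokens : List String) (cur : List Char)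
    (p : List Char) (ps : List (List Char)) :
    parseParts tokens cur true (p :: ps) = parseParts tokens (cur ++ p) false ps := by
  simp [parseParts]

-- main invariant: A's machine over the rejoined parts = B's loop over the parts
theorem parseRun_parseParts (parts : List (List Char))
    (hq : ∀ p ∈ parts, '"' ∉ p) :
    ∀ (tokens : List String) (cur : List Char) (inside : Bool),
      parseRun tokens cur inside (joinQ parts) = parseParts tokens cur inside parts := by
  induction parts with
  | nil => intro tokens cur inside; cases inside <;> rfl
  | cons p ps ih =>
    intro tokens cur inside
    have hp : '"' ∉ p := hq p (by simp)
    have hps : ∀ q ∈ ps, '"' ∉ q := fun q hm => hq q (by simp [hm])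
    cases ps with
    | nil =>
      cases inside with
      | false =>
        have h := parseRun_emit p hp [] tokens cur
        simp only [List.append_nil] at h
        rw [show joinQ [p] = p from rfl, h, parseParts_cons_false]
        rfl
      | true =>
        have h := parseRun_instring p hp [] tokens cur
        simp only [List.append_nil] at h
        rw [show joinQ [p] = p from rfl, h, parseParts_cons_true]
        rfl
    | cons q qs =>
      have hjq : joinQ (p :: q :: qs) = p ++ '"' :: joinQ (q :: qs) := rfl
      cases inside with
      | false =>
        rw [hjq, parseRun_emit p hp _ tokens cur, parseRun_quote_false,
          ih hps _ _ true, parseParts_cons_false]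
      | true =>
        rw [hjq, parseRun_instring p hp _ tokens cur, parseRun_quote_true,
          ih hps _ _ false, parseParts_cons_true]

-- ===== VERDICT (by name: the statement is the Claim_ definition above) =====
theorem parse_spec : Claim_equal_parse := by
  intro line _ _
  unfold Spec_parse parse parse_alt
  conv_lhs => rw [← joinQ_splitChar line.toList]
  exact parseRun_parseParts _ (splitChar_not_mem '"' line.toList) [] [] false
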